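-- pv_equiv track=rewrite | github.com/leslie071564/rnnSelectionalPreference | SampleGenerator.py | get_pa_training_instance
-- ===== SOURCE A (Python) =====
-- def get_pa_training_instance(pa):
--     pred, args = pa
--     args = ["%s %s" % (arg, case) for arg, case in args]
--     training_instances = []
--     for index, arg in enumerate(args):
--         arg, case = arg.split()
--         src_args = " ".join(arg for arg_index, arg in enumerate(args) if arg_index != index)
--         src = "%s %s %s" % (src_args, pred, case)
--         tgt = arg
--         training_instances.append([src.lstrip(), tgt])
--     return training_instances
-- ===== SOURCE B (Python) =====
-- def get_pa_training_instance(pa):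
--     # Same return value as A; builds prefix/suffix join tables once instead of
--     # re-joining all other args for every index.
--     pred, args = pa
--     joined = ["%s %s" % (arg, case) for arg, case in args]
--     prefixes = [""]                      # prefixes[i] = " ".join(joined[:i])
--     for s in joined:
--         prefixes.append(prefixes[-1] + " " + s if prefixes[-1] else s)
--     suffixes = [""]
--     for s in reversed(joined):
--         suffixes.append(s + " " + suffixes[-1] if suffixes[-1] else s)
--     suffixes.reverse()                   # suffixes[i] = " ".join(joined[i:])
--     out = []
--     for i, s in enumerate(joined):
--         arg, case = s.split()
--         pre, suf = prefixes[i], suffixes[i + 1]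
--         src_args = pre + " " + suf if pre and suf else (pre or suf)
--         out.append([(src_args + " " + pred + " " + case).lstrip(), arg])
--     return out
-- ===== Notes on version B (the rewrite author's own statement) =====
-- stated objective: alternative
-- what changed: B builds prefix/suffix join tables in two linear passes and combines two table entries per index, instead of A's re-join over all other args for every index.
import Mathlib
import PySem

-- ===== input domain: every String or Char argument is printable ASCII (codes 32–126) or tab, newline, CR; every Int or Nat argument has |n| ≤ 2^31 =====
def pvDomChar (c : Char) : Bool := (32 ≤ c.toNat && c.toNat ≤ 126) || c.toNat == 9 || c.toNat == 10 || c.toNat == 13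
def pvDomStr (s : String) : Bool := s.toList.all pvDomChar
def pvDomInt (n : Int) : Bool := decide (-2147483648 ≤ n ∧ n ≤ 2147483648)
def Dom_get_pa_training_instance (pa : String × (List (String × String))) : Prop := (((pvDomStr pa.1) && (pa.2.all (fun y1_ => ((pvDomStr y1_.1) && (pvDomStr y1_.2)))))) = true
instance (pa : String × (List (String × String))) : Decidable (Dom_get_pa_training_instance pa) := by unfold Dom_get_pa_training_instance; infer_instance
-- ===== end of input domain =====

-- B replaces A's per-index re-join of all other args by prefix/suffix join tables built once
-- (objective: alternative decomposition; same return value).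

-- ===== PORT A =====
def get_pa_training_instance (pa : String × (List (String × String))) : List (List String) :=
  let pred := pa.1
  let args := pa.2.map (fun ac => ac.1 ++ " " ++ ac.2)
  (PySem.List.enumerate args).foldl (fun acc p =>
    match PySem.Str.split₀ p.2 with
    | [arg, case_] =>
      let src_args := PySem.Str.join " "
        (((PySem.List.enumerate args).filter (fun q => q.1 != p.1)).map (·.2))
      let src := src_args ++ " " ++ pred ++ " " ++ case_
      acc ++ [[PySem.Str.lstrip src, arg]]
    | _ => acc) []   -- unpacking 'arg, case = arg.split()' raises ValueError: excluded by Pre_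

-- ===== PORT B =====
def get_pa_training_instance_alt (pa : String × (List (String × String))) : List (List String) :=
  let pred := pa.1
  let joined := pa.2.map (fun ac => ac.1 ++ " " ++ ac.2)
  let prefixes := joined.foldl (fun ps s =>
      ps ++ [if PySem.List.pyGetD ps (-1) "" ≠ "" then PySem.List.pyGetD ps (-1) "" ++ " " ++ s else s]) [""]
  let suffixes := (joined.reverse.foldl (fun ss s =>
      ss ++ [if PySem.List.pyGetD ss (-1) "" ≠ "" then s ++ " " ++ PySem.List.pyGetD ss (-1) "" else s]) [""]).reverse
  (PySem.List.enumerate joined).foldl (fun acc p =>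
    let parts := PySem.Str.split₀ p.2
    if parts.length == 2 then   -- 'arg, case = s.split()' unpacks iff exactly two tokens
      let arg := parts.getD 0 ""
      let case_ := parts.getD 1 ""
      let pre := PySem.List.pyGetD prefixes p.1 ""
      let suf := PySem.List.pyGetD suffixes (p.1 + 1) ""
      let src_args := if pre ≠ "" ∧ suf ≠ "" then pre ++ " " ++ suf else if pre ≠ "" then pre else suf
      acc ++ [[PySem.Str.lstrip (src_args ++ " " ++ pred ++ " " ++ case_), arg]]
    else acc) []   -- same ValueError point as A: excluded by Pre_

-- ===== PRECONDITION & SPEC =====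
-- Pre_ excludes exactly the inputs where Python A raises ValueError: some "arg case"
-- string does not split into exactly two whitespace-delimited tokens.
def Pre_get_pa_training_instance (pa : String × (List (String × String))) : Prop :=
  ∀ ac ∈ pa.2, (PySem.Str.split₀ (ac.1 ++ " " ++ ac.2)).length = 2
instance (pa : String × (List (String × String))) : Decidable (Pre_get_pa_training_instance pa) := by unfold Pre_get_pa_training_instance; infer_instance
def pvWitness_get_pa_training_instance : (String × (List (String × String))) :=
  ("likes", [("john", "ga"), ("mary", "wo")])
def Spec_get_pa_training_instance (pa : String × (List (String × String))) (out : List (List String)) : Prop := out = get_pa_training_instance_alt pa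
instance (pa : String × (List (String × String))) (out : List (List String)) : Decidable (Spec_get_pa_training_instance pa out) := by unfold Spec_get_pa_training_instance; infer_instance

-- ===== CLAIM (what is proved, stated in full; the proofs are below) =====
def Claim_equal_get_pa_training_instance : Prop := ∀ (pa : String × (List (String × String))), Dom_get_pa_training_instance pa → Pre_get_pa_training_instance pa → Spec_get_pa_training_instance pa (get_pa_training_instance pa)


-- ===== LEMMAS AND PROOFS =====
def pvJoin (l : List String) : String := PySem.Str.join " " l

theorem pvJoin_nil : pvJoin [] = "" := by
  apply String.toList_inj.mp
  simp [pvJoin, PySem.Str.toList_join, PySem.Chars.join_nil]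

theorem pvToList_ne (s : String) (h : s ≠ "") : s.toList ≠ [] := by
  intro hc; exact h (String.toList_inj.mp (by simp [hc]))

theorem pvElem_ne (x y : String) : x ++ " " ++ y ≠ "" := by
  intro h
  have := congrArg String.toList h
  simp [String.toList_append] at this

theorem pvJoin_ne (u : List String) (hu : u ≠ []) (he : ∀ e ∈ u, e ≠ "") : pvJoin u ≠ "" := by
  intro hc
  have hc' := congrArg String.toList hc
  rw [pvJoin, PySem.Str.toList_join] at hc'
  simp only [String.toList_empty] at hc'
  induction u with
  | nil => exact hu rfl
  | cons a u ih =>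
    cases u with
    | nil =>
      rw [List.map_cons, List.map_nil, PySem.Chars.join_singleton] at hc'
      exact pvToList_ne a (he a (by simp)) hc'
    | cons b v =>
      rw [List.map_cons, List.map_cons, PySem.Chars.join_cons_cons] at hc'
      have := pvToList_ne a (he a (by simp))
      simp [List.append_eq_nil_iff] at hc'

theorem pvJoin_append (u v : List String) (hu : u ≠ []) (hv : v ≠ []) :
    pvJoin (u ++ v) = pvJoin u ++ " " ++ pvJoin v := by
  apply String.toList_inj.mp
  simp only [pvJoin, PySem.Str.toList_join, String.toList_append, List.map_append]
  induction u with
  | nil => exact absurd rfl hu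
  | cons a u ih =>
    cases u with
    | nil =>
      cases v with
      | nil => exact absurd rfl hv
      | cons b w =>
        simp only [List.map_cons, List.map_nil, List.nil_append, List.cons_append,
          PySem.Chars.join_singleton, PySem.Chars.join_cons_cons]
    | cons c u' =>
      have ih' := ih (by simp)
      simp only [List.map_cons, List.cons_append, PySem.Chars.join_cons_cons] at ih' ⊢
      rw [ih']
      simp [List.append_assoc]

theorem pvJoin_snoc (t : List String) (s : String) (he : ∀ e ∈ t, e ≠ "") :
    pvJoin (t ++ [s]) = if pvJoin t ≠ "" then pvJoin t ++ " " ++ s else s := by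
  cases t with
  | nil =>
    simp [pvJoin_nil]
    apply String.toList_inj.mp
    simp [pvJoin, PySem.Str.toList_join, PySem.Chars.join_singleton]
  | cons a t' =>
    rw [if_pos (pvJoin_ne _ (by simp) he)]
    rw [pvJoin_append _ [s] (by simp) (by simp)]
    congr 1
    apply String.toList_inj.mp
    simp [pvJoin, PySem.Str.toList_join, PySem.Chars.join_singleton]

theorem pvJoin_cons (t : List String) (s : String) (he : ∀ e ∈ t, e ≠ "") :
    pvJoin (s :: t) = if pvJoin t ≠ "" then s ++ " " ++ pvJoin t else s := by
  cases t with
  | nil =>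
    simp [pvJoin_nil]
    apply String.toList_inj.mp
    simp [pvJoin, PySem.Str.toList_join, PySem.Chars.join_singleton]
  | cons a t' =>
    rw [if_pos (pvJoin_ne _ (by simp) he)]
    have : s :: a :: t' = [s] ++ (a :: t') := rfl
    rw [this, pvJoin_append [s] _ (by simp) (by simp)]
    congr 1
    apply String.toList_inj.mp
    simp [pvJoin, PySem.Str.toList_join, PySem.Chars.join_singleton]

theorem pvPreFold (l : List String) (he : ∀ e ∈ l, e ≠ "") :
    ∀ (acc t : List String), (∀ e ∈ t, e ≠ "") →
    l.foldl (fun ps s =>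
        ps ++ [if PySem.List.pyGetD ps (-1) "" ≠ "" then PySem.List.pyGetD ps (-1) "" ++ " " ++ s else s])
      (acc ++ [pvJoin t])
      = acc ++ (List.range (l.length + 1)).map (fun i => pvJoin (t ++ l.take i)) := by
  induction l with
  | nil => intro acc t ht; simp
  | cons s l ih =>
    intro acc t ht
    have hs : s ≠ "" := he s (by simp)
    rw [List.foldl_cons]
    have hstep : (if PySem.List.pyGetD (acc ++ [pvJoin t]) (-1) "" ≠ "" then PySem.List.pyGetD (acc ++ [pvJoin t]) (-1) "" ++ " " ++ s else s) = pvJoin (t ++ [s]) := by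
      rw [PySem.List.pyGetD_neg_one_append_singleton acc (pvJoin t) "", pvJoin_snoc t s ht]
    have ht' : ∀ e ∈ t ++ [s], e ≠ "" := by
      intro e hm; rcases List.mem_append.mp hm with h | h
      · exact ht e h
      · simp at h; subst h; exact hs
    rw [hstep, show acc ++ [pvJoin t] ++ [pvJoin (t ++ [s])] = (acc ++ [pvJoin t]) ++ [pvJoin (t ++ [s])] from rfl,
      ih (fun e hm => he e (by simp [hm])) (acc ++ [pvJoin t]) (t ++ [s]) ht']
    rw [List.length_cons, List.range_succ_eq_map (n := l.length + 1)]
    simp only [List.map_cons, List.take_zero, List.append_nil, List.map_map, List.append_assoc,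
      List.singleton_append]
    simp [Function.comp_def]

theorem pvSufFold (l : List String) (he : ∀ e ∈ l, e ≠ "") :
    ∀ (acc t : List String), (∀ e ∈ t, e ≠ "") →
    l.foldl (fun ss s =>
        ss ++ [if PySem.List.pyGetD ss (-1) "" ≠ "" then s ++ " " ++ PySem.List.pyGetD ss (-1) "" else s])
      (acc ++ [pvJoin t])
      = acc ++ (List.range (l.length + 1)).map (fun i => pvJoin ((l.take i).reverse ++ t)) := by
  induction l with
  | nil => intro acc t ht; simp
  | cons s l ih =>
    intro acc t ht
    have hs : s ≠ "" := he s (by simp)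
    rw [List.foldl_cons]
    have hstep : (if PySem.List.pyGetD (acc ++ [pvJoin t]) (-1) "" ≠ "" then s ++ " " ++ PySem.List.pyGetD (acc ++ [pvJoin t]) (-1) "" else s) = pvJoin (s :: t) := by
      rw [PySem.List.pyGetD_neg_one_append_singleton acc (pvJoin t) "", pvJoin_cons t s ht]
    have ht' : ∀ e ∈ s :: t, e ≠ "" := by
      intro e hm; rcases List.mem_cons.mp hm with h | h
      · subst h; exact hs
      · exact ht e h
    rw [hstep, show acc ++ [pvJoin t] ++ [pvJoin (s :: t)] = (acc ++ [pvJoin t]) ++ [pvJoin (s :: t)] from rfl,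
      ih (fun e hm => he e (by simp [hm])) (acc ++ [pvJoin t]) (s :: t) ht']
    rw [List.length_cons, List.range_succ_eq_map (n := l.length + 1)]
    simp only [List.map_cons, List.take_zero, List.reverse_nil, List.nil_append, List.map_map,
      List.append_assoc, List.singleton_append]
    simp [Function.comp_def]


theorem pvPrefixes (l : List String) (he : ∀ e ∈ l, e ≠ "") :
    l.foldl (fun ps s =>
        ps ++ [if PySem.List.pyGetD ps (-1) "" ≠ "" then PySem.List.pyGetD ps (-1) "" ++ " " ++ s else s]) [""]
      = (List.range (l.length + 1)).map (fun i => pvJoin (l.take i)) := by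
  have h := pvPreFold l he [] [] (by simp)
  simp only [pvJoin_nil, List.nil_append] at h
  simpa using h

theorem pvSuffixes (l : List String) (he : ∀ e ∈ l, e ≠ "") :
    (l.reverse.foldl (fun ss s =>
        ss ++ [if PySem.List.pyGetD ss (-1) "" ≠ "" then s ++ " " ++ PySem.List.pyGetD ss (-1) "" else s]) [""]).reverse
      = (List.range (l.length + 1)).map (fun i => pvJoin (l.drop i)) := by
  have h := pvSufFold l.reverse (by intro e hm; exact he e (List.mem_reverse.mp hm)) [] [] (by simp)
  simp only [pvJoin_nil, List.nil_append, List.append_nil, List.length_reverse] at h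
  rw [h]
  apply List.ext_getElem
  · simp
  · intro j h1 h2
    simp only [List.length_reverse, List.length_map, List.length_range] at h1 h2
    rw [List.getElem_reverse]
    simp only [List.getElem_map, List.getElem_range, List.length_map, List.length_range]
    rw [List.take_reverse, List.reverse_reverse]
    congr 2
    omega

theorem pvSrcArgs (l : List String) (he : ∀ e ∈ l, e ≠ "") (k : Nat) :
    pvJoin (l.take k ++ l.drop (k + 1))
      = (if pvJoin (l.take k) ≠ "" ∧ pvJoin (l.drop (k + 1)) ≠ "" then
            pvJoin (l.take k) ++ " " ++ pvJoin (l.drop (k + 1))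
         else if pvJoin (l.take k) ≠ "" then pvJoin (l.take k) else pvJoin (l.drop (k + 1))) := by
  have het : ∀ e ∈ l.take k, e ≠ "" := fun e hm => he e (List.mem_of_mem_take hm)
  have hed : ∀ e ∈ l.drop (k+1), e ≠ "" := fun e hm => he e (List.mem_of_mem_drop hm)
  by_cases h1 : l.take k = []
  · by_cases h2 : l.drop (k+1) = []
    · simp [h1, h2, pvJoin_nil]
    · rw [h1, List.nil_append, if_neg (by simp [pvJoin_nil]), if_neg (by simp [pvJoin_nil])]
  · have hpre := pvJoin_ne _ h1 het
    by_cases h2 : l.drop (k+1) = []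
    · rw [h2, List.append_nil, if_neg (by simp [pvJoin_nil]), if_pos hpre]
    · have hsuf := pvJoin_ne _ h2 hed
      rw [pvJoin_append _ _ h1 h2, if_pos ⟨hpre, hsuf⟩]

theorem pvFilter_enum {α : Type} (xs : List α) (s : Int) (k : Nat) (hk : k < xs.length) :
    ((PySem.List.enumerate xs s).filter (fun q => q.1 != s + (k : Int))).map (·.2)
      = xs.take k ++ xs.drop (k + 1) := by
  induction xs generalizing s k with
  | nil => simp at hk
  | cons x xs ih =>
    rw [PySem.List.enumerate_cons, List.filter_cons]
    cases k with
    | zero =>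
      have h0 : ((s : Int) != s + ((0:Nat) : Int)) = false := by simp
      rw [h0, if_neg (by simp)]
      have hall : (PySem.List.enumerate xs (s+1)).filter (fun q => q.1 != s + ((0:Nat) : Int)) = PySem.List.enumerate xs (s+1) := by
        apply List.filter_eq_self.mpr
        intro p hp
        rcases (PySem.List.mem_enumerate_iff xs (s+1) p).mp hp with ⟨k', hk', rfl⟩
        simp only [bne_iff_ne, ne_eq]
        intro h; omega
      rw [hall, PySem.List.map_snd_enumerate]
      simp
    | succ k' =>
      have h1 : ((s : Int) != s + ((k'+1:Nat) : Int)) = true := by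
        simp only [bne_iff_ne, ne_eq]; intro h; omega
      rw [h1, if_pos rfl]
      have hrw : (fun (q : Int × α) => q.1 != s + ((k'+1:Nat) : Int)) = (fun q => q.1 != (s+1) + ((k':Nat) : Int)) := by
        funext q; congr 1; push_cast; ring
      rw [List.map_cons, hrw, ih (s+1) k' (by simpa using hk)]
      simp

theorem get_pa_training_instance_spec : Claim_equal_get_pa_training_instance := by
  intro pa _hDom _hPre
  unfold Spec_get_pa_training_instance
  show get_pa_training_instance pa = get_pa_training_instance_alt pa
  unfold get_pa_training_instance get_pa_training_instance_alt
  simp only [ne_eq]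
  have hne : ∀ e ∈ pa.2.map (fun ac => ac.1 ++ " " ++ ac.2), e ≠ "" := by
    intro e hm
    rcases List.mem_map.mp hm with ⟨ac, _, rfl⟩
    exact pvElem_ne ac.1 ac.2
  set j := pa.2.map (fun ac => ac.1 ++ " " ++ ac.2) with hj
  rw [pvPrefixes j hne, pvSuffixes j hne]
  apply PySem.List.foldl_congr_mem
  intro acc p hp
  rcases (PySem.List.mem_enumerate_iff j 0 p).mp hp with ⟨k, hk, rfl⟩
  simp only [zero_add]
  rcases hsp : PySem.Str.split₀ (j[k]) with _ | ⟨a, _ | ⟨c, _ | ⟨d, r⟩⟩⟩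
  · simp
  · simp
  · have hsrc :
        PySem.Str.join " " (((PySem.List.enumerate j).filter (fun q => q.1 != ((k : Int)))).map (·.2))
          = pvJoin (j.take k ++ j.drop (k + 1)) := by
      have := pvFilter_enum j 0 k hk
      simp only [zero_add] at this
      rw [this, pvJoin]
    have hpre : PySem.List.pyGetD ((List.range (j.length + 1)).map (fun i => pvJoin (j.take i))) ((k : Int)) ""
        = pvJoin (j.take k) := by
      rw [PySem.List.pyGetD_natCast]
      rw [List.getD_eq_getElem _ _ (by simp; omega)]
      simp
    have hsuf : PySem.List.pyGetD ((List.range (j.length + 1)).map (fun i => pvJoin (j.drop i))) ((k : Int) + 1) ""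
        = pvJoin (j.drop (k + 1)) := by
      rw [show ((k : Int) + 1) = ((k + 1 : Nat) : Int) by push_cast; ring]
      rw [PySem.List.pyGetD_natCast]
      rw [List.getD_eq_getElem _ _ (by simp; omega)]
      simp
    simp only [List.length_cons, List.length_nil]
    rw [if_pos (by decide)]
    simp only [List.getD_cons_zero, List.getD_cons_succ]
    rw [hpre, hsuf, hsrc, pvSrcArgs j hne k]
  · simp
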